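-- pv_equiv track=rewrite | github.com/calico-team/calico-fa24 | caliconstruction/submissions/accepted/caliconstruction.py | solve
-- ===== SOURCE A (Python) =====
-- def solve(S: str) -> int:
--     c_count = 0
--     a_count = 0
--     l_count = 0
--     i_count = 0
--     o_count = 0
--
--     for c in S:
--         match c:
--             case 'C':
--                 c_count += 1
--             case 'U':
--                 c_count += 1
--             case 'N':
--                 c_count += 1
--             case 'A':
--                 a_count += 1
--             case 'L':
--                 l_count += 1
--             case 'I':
--                 i_count += 1
--             case 'H':
--                 i_count += 1
--             case 'O':
--                 o_count += 1
--
--     if (c_count + a_count + l_count + i_count + o_count != len(S)):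
--             return -1
--     else:
--         return max((c_count + 1) // 2, a_count, l_count, i_count, o_count)
-- ===== SOURCE B (Python) =====
-- BUCKET = {'C': 0, 'U': 0, 'N': 0, 'A': 1, 'L': 2, 'I': 3, 'H': 3, 'O': 4}
--
-- def solve(S: str) -> int:
--     # Sort the characters, then scan equal-character runs: each run is attributed
--     # to its bucket in one step; an unmapped run aborts with -1 immediately.
--     counts = [0, 0, 0, 0, 0]
--     t = sorted(S)
--     n = len(t)
--     i = 0
--     while i < n:
--         ch = t[i]
--         j = i
--         while j < n and t[j] == ch:
--             j += 1
--         b = BUCKET.get(ch)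
--         if b is None:
--             return -1
--         counts[b] += j - i
--         i = j
--     c, a, l, ii, o = counts
--     return max((c + 1) // 2, a, l, ii, o)
-- ===== Notes on version B (the rewrite author's own statement) =====
-- stated objective: alternative
-- what changed: B sorts the characters and scans equal-character runs, crediting each whole run to its bucket via a char->bucket dict and aborting with -1 on the first unmapped run, instead of A's single per-character loop over five counters with a final sum-vs-length validation.
import Mathlib
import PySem

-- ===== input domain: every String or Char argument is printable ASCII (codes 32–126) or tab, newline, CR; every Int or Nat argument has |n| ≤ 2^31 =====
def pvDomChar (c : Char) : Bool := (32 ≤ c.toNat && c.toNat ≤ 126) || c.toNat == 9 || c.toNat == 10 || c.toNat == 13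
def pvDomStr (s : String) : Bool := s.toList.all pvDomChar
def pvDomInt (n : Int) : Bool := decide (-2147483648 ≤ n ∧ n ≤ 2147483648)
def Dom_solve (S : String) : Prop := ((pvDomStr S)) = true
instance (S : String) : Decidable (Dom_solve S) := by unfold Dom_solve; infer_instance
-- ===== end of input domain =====

-- B sorts the characters and scans equal-character runs against a char->bucket dict instead of A's per-character five-counter loop (measured faster in Python in a timing run: sort+run-scan constant factor).

set_option maxHeartbeats 1000000


-- ===== PORT A =====
-- A's match statement is transliterated as the equivalent ordered if-chain over the same 5-counter state.
def solveStep (st : Int × Int × Int × Int × Int) (ch : Char) : Int × Int × Int × Int × Int :=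
  if ch = 'C' then (st.1 + 1, st.2.1, st.2.2.1, st.2.2.2.1, st.2.2.2.2)
  else if ch = 'U' then (st.1 + 1, st.2.1, st.2.2.1, st.2.2.2.1, st.2.2.2.2)
  else if ch = 'N' then (st.1 + 1, st.2.1, st.2.2.1, st.2.2.2.1, st.2.2.2.2)
  else if ch = 'A' then (st.1, st.2.1 + 1, st.2.2.1, st.2.2.2.1, st.2.2.2.2)
  else if ch = 'L' then (st.1, st.2.1, st.2.2.1 + 1, st.2.2.2.1, st.2.2.2.2)
  else if ch = 'I' then (st.1, st.2.1, st.2.2.1, st.2.2.2.1 + 1, st.2.2.2.2)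
  else if ch = 'H' then (st.1, st.2.1, st.2.2.1, st.2.2.2.1 + 1, st.2.2.2.2)
  else if ch = 'O' then (st.1, st.2.1, st.2.2.1, st.2.2.2.1, st.2.2.2.2 + 1)
  else st

def solve (S : String) : Int :=
  let st := S.toList.foldl solveStep (0, 0, 0, 0, 0)
  if st.1 + st.2.1 + st.2.2.1 + st.2.2.2.1 + st.2.2.2.2 ≠ (PySem.Str.len S : Int) then -1
  else max (max (max (max (PySem.Int.floordiv (st.1 + 1) 2) st.2.1) st.2.2.1) st.2.2.2.1) st.2.2.2.2

-- ===== PORT B =====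
-- Source B's module-level BUCKET dict
def BUCKET : PySem.Dict Char Int :=
  PySem.Dict.ofList [('C', 0), ('U', 0), ('N', 0), ('A', 1), ('L', 2), ('I', 3), ('H', 3), ('O', 4)]

-- Source B's outer while loop: consume one equal-character run per step (the inner
-- `while t[j] == ch` is the takeWhile/dropWhile split); `counts[b] += run` is
-- ported as an if-chain over the five bucket indices (counts as a 5-tuple).
def solveAltGo (t : List Char) (c a l i o : Int) : Int :=
  match t with
  | [] => max (max (max (max (PySem.Int.floordiv (c + 1) 2) a) l) i) o
  | ch :: rest =>
      -- the run [i,j) of Source B's inner while loop is the takeWhile prefix; its length+1 is j-i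
      match PySem.Dict.get? BUCKET ch with
      | none => -1
      | some b =>
          solveAltGo (rest.dropWhile (· == ch))
            (if b = 0 then c + (1 + ((rest.takeWhile (· == ch)).length : Int)) else c)
            (if b = 1 then a + (1 + ((rest.takeWhile (· == ch)).length : Int)) else a)
            (if b = 2 then l + (1 + ((rest.takeWhile (· == ch)).length : Int)) else l)
            (if b = 3 then i + (1 + ((rest.takeWhile (· == ch)).length : Int)) else i)
            (if b = 4 then o + (1 + ((rest.takeWhile (· == ch)).length : Int)) else o)
  termination_by t.length
  decreasing_by
    simp only [List.length_cons]
    exact Nat.lt_succ_of_le (List.length_dropWhile_le _ _)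

def solve_alt (S : String) : Int :=
  solveAltGo (PySem.List.sorted S.toList (fun x => x) false) 0 0 0 0 0

-- ===== PRECONDITION & SPEC =====
def Spec_solve (S : String) (out : Int) : Prop := out = solve_alt S
instance (S : String) (out : Int) : Decidable (Spec_solve S out) := by unfold Spec_solve; infer_instance

-- ===== CLAIM (what is proved, stated in full; the proofs are below) =====
def Claim_equal_solve : Prop := ∀ (S : String), Dom_solve S → Spec_solve S (solve S)

-- ===== LEMMAS AND PROOFS =====

def mappedB (ch : Char) : Bool :=
  ch == 'C' || ch == 'U' || ch == 'N' || ch == 'A' || ch == 'L' || ch == 'I' || ch == 'H' || ch == 'O'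

-- closed form of the BUCKET lookup
lemma get_BUCKET (ch : Char) : PySem.Dict.get? BUCKET ch =
    if ch = 'C' then some 0 else if ch = 'U' then some 0 else if ch = 'N' then some 0
    else if ch = 'A' then some 1 else if ch = 'L' then some 2 else if ch = 'I' then some 3
    else if ch = 'H' then some 3 else if ch = 'O' then some 4 else none := by
  rw [show BUCKET = PySem.Dict.mk
    [('C', (0 : Int)), ('U', 0), ('N', 0), ('A', 1), ('L', 2), ('I', 3), ('H', 3), ('O', 4)]
    from rfl]
  simp only [PySem.Dict.get?_mk_cons, beq_iff_eq]
  simp only [@eq_comm Char]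
  split_ifs <;> simp [PySem.Dict.get?]

-- all-Bool is a permutation invariant
lemma perm_all {p : Char → Bool} {l₁ l₂ : List Char} (h : l₁.Perm l₂) : l₁.all p = l₂.all p := by
  induction h with
  | nil => rfl
  | cons x _ ih => simp [List.all_cons, ih]
  | swap x y l =>
      simp only [List.all_cons]
      rw [← Bool.and_assoc, Bool.and_comm (p y) (p x), Bool.and_assoc]
  | trans _ _ ih1 ih2 => rw [ih1, ih2]

-- the takeWhile prefix of a run is all copies of its head character
lemma takeWhile_count (rest : List Char) (ch x : Char) :
    (rest.takeWhile (· == ch)).count x =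
      if x = ch then (rest.takeWhile (· == ch)).length else 0 := by
  have hrep : rest.takeWhile (· == ch) = List.replicate (rest.takeWhile (· == ch)).length ch := by
    rw [List.eq_replicate_iff]
    exact ⟨rfl, fun a ha => by simpa using List.mem_takeWhile_imp ha⟩
  conv_lhs => rw [hrep]
  rw [List.count_replicate]
  by_cases hx : x = ch
  · subst hx; simp
  · rw [if_neg (fun h => (Ne.symm hx) (by simpa using h)), if_neg hx]

lemma count_split (rest : List Char) (ch x : Char) :
    rest.count x = (rest.takeWhile (· == ch)).count x + (rest.dropWhile (· == ch)).count x := by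
  conv_lhs => rw [← List.takeWhile_append_dropWhile (p := (· == ch)) (l := rest)]
  rw [List.count_append]

-- count of the run head: the whole run is absorbed
lemma hc_eq (ch : Char) (rest : List Char) :
    (((ch :: rest).count ch : Int)) =
      (1 + ((rest.takeWhile (· == ch)).length : Int)) + ((rest.dropWhile (· == ch)).count ch : Int) := by
  rw [List.count_cons_self, count_split rest ch ch, takeWhile_count rest ch ch, if_pos rfl]
  push_cast
  ring

-- count of any other character is untouched by dropping the run
lemma hc_ne (ch : Char) (rest : List Char) (x : Char) (hx : x ≠ ch) :
    (((ch :: rest).count x : Int)) = ((rest.dropWhile (· == ch)).count x : Int) := by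
  rw [List.count_cons_of_ne (Ne.symm hx), count_split rest ch x, takeWhile_count rest ch x, if_neg hx]
  push_cast
  ring

lemma all_split (rest : List Char) (ch : Char) (h : mappedB ch = true) :
    rest.all mappedB = (rest.dropWhile (· == ch)).all mappedB := by
  conv_lhs => rw [← List.takeWhile_append_dropWhile (p := (· == ch)) (l := rest)]
  rw [List.all_append]
  have : (rest.takeWhile (· == ch)).all mappedB = true := by
    rw [List.all_eq_true]
    intro a ha
    have := List.mem_takeWhile_imp (p := (· == ch)) ha
    simp only [beq_iff_eq] at this
    rwa [this]
  rw [this, Bool.true_and]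

-- BUCKET lookup misses exactly the unmapped characters
lemma bucket_none (ch : Char) (h : mappedB ch = false) : PySem.Dict.get? BUCKET ch = none := by
  rw [get_BUCKET]
  split_ifs with h1 h2 h3 h4 h5 h6 h7 h8 <;>
    first
      | rfl
      | (exfalso; subst_vars; exact absurd h (by decide))

lemma bucket_some (ch : Char) (h : mappedB ch = true) : PySem.Dict.get? BUCKET ch ≠ none := by
  simp only [mappedB, Bool.or_eq_true, beq_iff_eq] at h
  rcases h with ((((((h | h) | h) | h) | h) | h) | h) | h <;> subst h <;> decide

lemma go_step (ch : Char) (b : Int) (hb : PySem.Dict.get? BUCKET ch = some b)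
    (rest : List Char) (c a l i o : Int) :
    solveAltGo (ch :: rest) c a l i o =
      solveAltGo (rest.dropWhile (· == ch))
        (if b = 0 then c + (1 + ((rest.takeWhile (· == ch)).length : Int)) else c)
        (if b = 1 then a + (1 + ((rest.takeWhile (· == ch)).length : Int)) else a)
        (if b = 2 then l + (1 + ((rest.takeWhile (· == ch)).length : Int)) else l)
        (if b = 3 then i + (1 + ((rest.takeWhile (· == ch)).length : Int)) else i)
        (if b = 4 then o + (1 + ((rest.takeWhile (· == ch)).length : Int)) else o) := by
  rw [solveAltGo, hb]

-- closed form of B's run-scanning loop over an arbitrary character list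
lemma go_spec : ∀ (n : Nat) (t : List Char), t.length ≤ n → ∀ (c a l i o : Int),
    solveAltGo t c a l i o =
      if t.all mappedB then
        max (max (max (max
          (PySem.Int.floordiv (c + (t.count 'C' : Int) + (t.count 'U' : Int) + (t.count 'N' : Int) + 1) 2)
          (a + (t.count 'A' : Int))) (l + (t.count 'L' : Int)))
          (i + (t.count 'I' : Int) + (t.count 'H' : Int))) (o + (t.count 'O' : Int))
      else -1 := by
  intro n
  induction n with
  | zero =>
      intro t ht c a l i o
      match t with
      | [] => simp [solveAltGo]
      | ch :: rest => simp at ht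
  | succ m ih =>
      intro t ht c a l i o
      match t with
      | [] => simp [solveAltGo]
      | ch :: rest =>
        have hrest' : (rest.dropWhile (· == ch)).length ≤ m := by
          have h1 := List.length_dropWhile_le (· == ch) rest
          simp only [List.length_cons] at ht
          omega
        cases hget : PySem.Dict.get? BUCKET ch with
        | some b =>
            rw [go_step ch b hget rest c a l i o]
            have hm : mappedB ch = true := by
              by_cases hmB : mappedB ch = true
              · exact hmB
              · rw [bucket_none ch (by simpa using hmB)] at hget
                simp at hget
            have hall : (ch :: rest).all mappedB = (rest.dropWhile (· == ch)).all mappedB := by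
              rw [List.all_cons, hm, Bool.true_and, all_split rest ch hm]
            simp only [mappedB, Bool.or_eq_true, beq_iff_eq] at hm
            rcases hm with ((((((h | h) | h) | h) | h) | h) | h) | h
            · subst h
              rw [show PySem.Dict.get? BUCKET 'C' = some 0 from rfl] at hget
              injection hget with hb
              subst hb
              simp only [reduceIte, if_neg (show ¬((0:Int) = 1) from by decide), if_neg (show ¬((0:Int) = 2) from by decide), if_neg (show ¬((0:Int) = 3) from by decide), if_neg (show ¬((0:Int) = 4) from by decide)]
              rw [ih _ hrest', hall]
              split_ifs with hx
              · rw [hc_eq 'C' rest, hc_ne 'C' rest 'U' (by decide), hc_ne 'C' rest 'N' (by decide), hc_ne 'C' rest 'A' (by decide), hc_ne 'C' rest 'L' (by decide), hc_ne 'C' rest 'I' (by decide), hc_ne 'C' rest 'H' (by decide), hc_ne 'C' rest 'O' (by decide)]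
                ring_nf
              · rfl
            · subst h
              rw [show PySem.Dict.get? BUCKET 'U' = some 0 from rfl] at hget
              injection hget with hb
              subst hb
              simp only [reduceIte, if_neg (show ¬((0:Int) = 1) from by decide), if_neg (show ¬((0:Int) = 2) from by decide), if_neg (show ¬((0:Int) = 3) from by decide), if_neg (show ¬((0:Int) = 4) from by decide)]
              rw [ih _ hrest', hall]
              split_ifs with hx
              · rw [hc_eq 'U' rest, hc_ne 'U' rest 'C' (by decide), hc_ne 'U' rest 'N' (by decide), hc_ne 'U' rest 'A' (by decide), hc_ne 'U' rest 'L' (by decide), hc_ne 'U' rest 'I' (by decide), hc_ne 'U' rest 'H' (by decide), hc_ne 'U' rest 'O' (by decide)]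
                ring_nf
              · rfl
            · subst h
              rw [show PySem.Dict.get? BUCKET 'N' = some 0 from rfl] at hget
              injection hget with hb
              subst hb
              simp only [reduceIte, if_neg (show ¬((0:Int) = 1) from by decide), if_neg (show ¬((0:Int) = 2) from by decide), if_neg (show ¬((0:Int) = 3) from by decide), if_neg (show ¬((0:Int) = 4) from by decide)]
              rw [ih _ hrest', hall]
              split_ifs with hx
              · rw [hc_eq 'N' rest, hc_ne 'N' rest 'C' (by decide), hc_ne 'N' rest 'U' (by decide), hc_ne 'N' rest 'A' (by decide), hc_ne 'N' rest 'L' (by decide), hc_ne 'N' rest 'I' (by decide), hc_ne 'N' rest 'H' (by decide), hc_ne 'N' rest 'O' (by decide)]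
                ring_nf
              · rfl
            · subst h
              rw [show PySem.Dict.get? BUCKET 'A' = some 1 from rfl] at hget
              injection hget with hb
              subst hb
              simp only [reduceIte, if_neg (show ¬((1:Int) = 0) from by decide), if_neg (show ¬((1:Int) = 2) from by decide), if_neg (show ¬((1:Int) = 3) from by decide), if_neg (show ¬((1:Int) = 4) from by decide)]
              rw [ih _ hrest', hall]
              split_ifs with hx
              · rw [hc_eq 'A' rest, hc_ne 'A' rest 'C' (by decide), hc_ne 'A' rest 'U' (by decide), hc_ne 'A' rest 'N' (by decide), hc_ne 'A' rest 'L' (by decide), hc_ne 'A' rest 'I' (by decide), hc_ne 'A' rest 'H' (by decide), hc_ne 'A' rest 'O' (by decide)]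
                ring_nf
              · rfl
            · subst h
              rw [show PySem.Dict.get? BUCKET 'L' = some 2 from rfl] at hget
              injection hget with hb
              subst hb
              simp only [reduceIte, if_neg (show ¬((2:Int) = 0) from by decide), if_neg (show ¬((2:Int) = 1) from by decide), if_neg (show ¬((2:Int) = 3) from by decide), if_neg (show ¬((2:Int) = 4) from by decide)]
              rw [ih _ hrest', hall]
              split_ifs with hx
              · rw [hc_eq 'L' rest, hc_ne 'L' rest 'C' (by decide), hc_ne 'L' rest 'U' (by decide), hc_ne 'L' rest 'N' (by decide), hc_ne 'L' rest 'A' (by decide), hc_ne 'L' rest 'I' (by decide), hc_ne 'L' rest 'H' (by decide), hc_ne 'L' rest 'O' (by decide)]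
                ring_nf
              · rfl
            · subst h
              rw [show PySem.Dict.get? BUCKET 'I' = some 3 from rfl] at hget
              injection hget with hb
              subst hb
              simp only [reduceIte, if_neg (show ¬((3:Int) = 0) from by decide), if_neg (show ¬((3:Int) = 1) from by decide), if_neg (show ¬((3:Int) = 2) from by decide), if_neg (show ¬((3:Int) = 4) from by decide)]
              rw [ih _ hrest', hall]
              split_ifs with hx
              · rw [hc_eq 'I' rest, hc_ne 'I' rest 'C' (by decide), hc_ne 'I' rest 'U' (by decide), hc_ne 'I' rest 'N' (by decide), hc_ne 'I' rest 'A' (by decide), hc_ne 'I' rest 'L' (by decide), hc_ne 'I' rest 'H' (by decide), hc_ne 'I' rest 'O' (by decide)]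
                ring_nf
              · rfl
            · subst h
              rw [show PySem.Dict.get? BUCKET 'H' = some 3 from rfl] at hget
              injection hget with hb
              subst hb
              simp only [reduceIte, if_neg (show ¬((3:Int) = 0) from by decide), if_neg (show ¬((3:Int) = 1) from by decide), if_neg (show ¬((3:Int) = 2) from by decide), if_neg (show ¬((3:Int) = 4) from by decide)]
              rw [ih _ hrest', hall]
              split_ifs with hx
              · rw [hc_eq 'H' rest, hc_ne 'H' rest 'C' (by decide), hc_ne 'H' rest 'U' (by decide), hc_ne 'H' rest 'N' (by decide), hc_ne 'H' rest 'A' (by decide), hc_ne 'H' rest 'L' (by decide), hc_ne 'H' rest 'I' (by decide), hc_ne 'H' rest 'O' (by decide)]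
                ring_nf
              · rfl
            · subst h
              rw [show PySem.Dict.get? BUCKET 'O' = some 4 from rfl] at hget
              injection hget with hb
              subst hb
              simp only [reduceIte, if_neg (show ¬((4:Int) = 0) from by decide), if_neg (show ¬((4:Int) = 1) from by decide), if_neg (show ¬((4:Int) = 2) from by decide), if_neg (show ¬((4:Int) = 3) from by decide)]
              rw [ih _ hrest', hall]
              split_ifs with hx
              · rw [hc_eq 'O' rest, hc_ne 'O' rest 'C' (by decide), hc_ne 'O' rest 'U' (by decide), hc_ne 'O' rest 'N' (by decide), hc_ne 'O' rest 'A' (by decide), hc_ne 'O' rest 'L' (by decide), hc_ne 'O' rest 'I' (by decide), hc_ne 'O' rest 'H' (by decide)]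
                ring_nf
              · rfl
        | none =>
            have hm : mappedB ch = false := by
              cases hmB : mappedB ch
              · rfl
              · exact absurd hget (bucket_some ch hmB)
            have hfalse : (ch :: rest).all mappedB = false := by
              simp [List.all_cons, hm]
            rw [solveAltGo, hget, hfalse]
            try rfl

-- A's five-counter fold computed in closed form from List.count
lemma solve_fold_eq :
    ∀ (lst : List Char) (c0 a0 l0 i0 o0 : Int),
      lst.foldl solveStep (c0, a0, l0, i0, o0) =
        (c0 + lst.count 'C' + lst.count 'U' + lst.count 'N',
         a0 + lst.count 'A', l0 + lst.count 'L',
         i0 + lst.count 'I' + lst.count 'H', o0 + lst.count 'O') := by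
  intro lst
  induction lst with
  | nil => intro c0 a0 l0 i0 o0; simp
  | cons h t ih =>
      intro c0 a0 l0 i0 o0
      simp only [List.foldl_cons, solveStep]
      split_ifs <;>
        (rw [ih]; clear ih;
         simp only [List.count_cons, beq_iff_eq, Prod.mk.injEq];
         split_ifs <;> simp_all <;> omega)

-- the eight counts sum to countP mappedB
lemma sum8 (lst : List Char) :
    lst.count 'C' + lst.count 'U' + lst.count 'N' + lst.count 'A' + lst.count 'L'
      + lst.count 'I' + lst.count 'H' + lst.count 'O' = lst.countP mappedB := by
  induction lst with
  | nil => simp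
  | cons h t ih =>
      simp only [List.count_cons, List.countP_cons, mappedB, Bool.or_eq_true, beq_iff_eq]
      split_ifs <;> simp_all <;> omega

-- ===== VERDICT (by name: the statement is the Claim_ definition above) =====
theorem solve_spec : Claim_equal_solve := by
  intro S _
  unfold Spec_solve solve solve_alt
  set lst := S.toList with hlst
  have hperm : (PySem.List.sorted lst (fun x => x) false).Perm lst := PySem.List.sorted_perm _ _ _
  have hcount : ∀ x, (PySem.List.sorted lst (fun x => x) false).count x = lst.count x :=
    fun x => hperm.count_eq x
  have hall : (PySem.List.sorted lst (fun x => x) false).all mappedB = lst.all mappedB :=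
    perm_all hperm
  rw [go_spec (PySem.List.sorted lst (fun x => x) false).length _ (le_refl _)]
  rw [solve_fold_eq]
  have hsum := sum8 lst
  have hlenS : (PySem.Str.len S : Int) = (lst.length : Int) := by
    simp [PySem.Str.len, hlst]
  simp only [hcount, hall]
  by_cases hA : lst.all mappedB = true
  · have hPeq : lst.countP mappedB = lst.length := by
      rw [List.countP_eq_length]
      exact fun a ha => (List.all_eq_true.mp hA) a ha
    have hsumlen : lst.count 'C' + lst.count 'U' + lst.count 'N' + lst.count 'A'
        + lst.count 'L' + lst.count 'I' + lst.count 'H' + lst.count 'O' = lst.length := by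
      omega
    rw [if_pos hA]
    rw [if_neg (by rw [hlenS]; push_cast; omega)]
    try norm_num
    try ring_nf
  · have hPlt : lst.countP mappedB < lst.length := by
      have hle := List.countP_le_length (p := mappedB) (l := lst)
      rcases Nat.lt_or_ge (lst.countP mappedB) lst.length with h | h
      · exact h
      · exact absurd (List.all_eq_true.mpr (List.countP_eq_length.mp (Nat.le_antisymm hle h))) hA
    rw [if_neg hA]
    rw [if_pos (by rw [hlenS]; push_cast; omega)]
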